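-- pv_equiv track=rewrite | github.com/Maxscha/commitbench | filter/helper.py | line_to_extension
-- ===== SOURCE A (Python) =====
-- def line_to_extension(line):
--     file = [item for item in line.split(' ') if item.strip() != '']
--     # take until first /
--     res = []
--     for item in reversed(file):
--         if item != '/':
--             res.append(item)
--         else:
--             break
--     res = list(reversed(res))
--     file = ''.join(res)
--
--     if '.' in file:
--         return file.split('.')[-1]
--     else:
--         return file.split('/')[-1]
-- ===== SOURCE B (Python) =====
-- def line_to_extension(line):
--     # index the last standalone '/' token and slice, instead of a reversed scan loop
--     toks = [t for t in line.split(' ') if t.strip() != '']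
--     if '/' in toks:
--         toks = toks[len(toks) - toks[::-1].index('/'):]
--     file = ''.join(toks)
--     if '.' in file:
--         return file.rpartition('.')[2]
--     return file.rpartition('/')[2]
-- ===== Notes on version B (the rewrite author's own statement) =====
-- stated objective: alternative
-- what changed: Replaces A's reversed accumulate-until-slash loop (with break and two reversed() calls) by locating the last slash separator token via list.index on the reversed token list and slicing, and replaces split(sep)[-1] by rpartition(sep)[2]; same values everywhere.
import Mathlib
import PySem

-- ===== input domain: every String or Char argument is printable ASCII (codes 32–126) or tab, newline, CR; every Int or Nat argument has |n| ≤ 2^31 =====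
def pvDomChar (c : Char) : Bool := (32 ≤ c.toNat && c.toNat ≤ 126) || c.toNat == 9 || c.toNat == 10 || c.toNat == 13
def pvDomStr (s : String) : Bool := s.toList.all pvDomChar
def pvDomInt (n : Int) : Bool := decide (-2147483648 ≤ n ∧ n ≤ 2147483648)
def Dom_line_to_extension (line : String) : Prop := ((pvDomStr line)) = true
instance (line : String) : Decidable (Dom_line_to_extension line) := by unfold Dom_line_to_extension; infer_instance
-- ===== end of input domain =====

-- B replaces A's reversed accumulate-until-'/' loop by an index-and-slice (last '/' token found
-- with list.index on the reversed list) and A's split(sep)[-1] by rpartition(sep)[2]: a different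
-- decomposition of the same task, same values everywhere.

-- ===== PORT A =====
-- A's loop "for item in reversed(file): if item != '/': res.append(item) else: break"
def pvRevTake : List String → List String → List String
  | [], res => res
  | item :: rest, res => if item != "/" then pvRevTake rest (res ++ [item]) else res

def line_to_extension (line : String) : String :=
  -- file = [item for item in line.split(' ') if item.strip() != '']
  let file := ((PySem.Str.split? line " ").getD []).filter (fun item => PySem.Str.strip item != "")
  let res := pvRevTake file.reverse []
  let res := res.reverse
  let file := PySem.Str.join "" res
  if PySem.Str.isIn "." file then
    -- split by a nonempty separator is never empty, so [-1] is the last element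
    ((PySem.Str.split? file ".").getD []).getLastD ""
  else
    ((PySem.Str.split? file "/").getD []).getLastD ""

-- ===== PORT B =====
-- file.rpartition(c)[2] for a one-character separator c: the suffix after the last occurrence of c
def pvRpartAfter (c : Char) (file : String) : String :=
  String.ofList ((file.toList.reverse.takeWhile (· != c)).reverse)

def line_to_extension_alt (line : String) : String :=
  let toks := ((PySem.Str.split? line " ").getD []).filter (fun t => PySem.Str.strip t != "")
  -- if '/' in toks: toks = toks[len(toks) - toks[::-1].index('/'):]   (list.index is present under the guard)
  let toks := if toks.contains "/" then
      PySem.List.slice toks (some ((toks.length : Int) - (((PySem.List.index? toks.reverse "/").getD 0 : Nat) : Int))) none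
    else toks
  let file := PySem.Str.join "" toks
  if PySem.Str.isIn "." file then
    pvRpartAfter '.' file
  else
    pvRpartAfter '/' file

-- ===== PRECONDITION & SPEC =====
def Spec_line_to_extension (line : String) (out : String) : Prop := out = line_to_extension_alt line
instance (line : String) (out : String) : Decidable (Spec_line_to_extension line out) := by unfold Spec_line_to_extension; infer_instance

-- ===== CLAIM (what is proved, stated in full; the proofs are below) =====
def Claim_equal_line_to_extension : Prop := ∀ (line : String), Dom_line_to_extension line → Spec_line_to_extension line (line_to_extension line)

-- ===== LEMMAS AND PROOFS =====

theorem pvRevTake_eq (xs acc : List String) :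
    pvRevTake xs acc = acc ++ xs.takeWhile (· != "/") := by
  induction xs generalizing acc with
  | nil => simp [pvRevTake]
  | cons x rest ih =>
    by_cases h : x != "/"
    · simp [pvRevTake, h, ih]
    · simp at h
      simp [pvRevTake, h]

theorem takeWhile_all_eq {α : Type} (p : α → Bool) (l : List α)
    (h : ∀ x ∈ l, p x = true) : l.takeWhile p = l := by
  induction l with
  | nil => rfl
  | cons a l ih =>
    simp [h a (by simp), ih (fun x hx => h x (by simp [hx]))]

theorem takeWhile_append_all {α : Type} (p : α → Bool) (l r : List α)
    (h : ∀ x ∈ l, p x = true) : (l ++ r).takeWhile p = l ++ r.takeWhile p := by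
  induction l with
  | nil => simp
  | cons a l ih =>
    simp [h a (by simp), ih (fun x hx => h x (by simp [hx]))]

theorem takeWhile_append_fail {α : Type} (p : α → Bool) (l r : List α)
    (h : ∃ x ∈ l, p x = false) : (l ++ r).takeWhile p = l.takeWhile p := by
  induction l with
  | nil => simp at h
  | cons a l ih =>
    by_cases ha : p a
    · obtain ⟨x, hx, hpx⟩ := h
      rcases List.mem_cons.mp hx with hx | hx
      · rw [hx] at hpx; simp [hpx] at ha
      · simp [ha, ih ⟨x, hx, hpx⟩]
    · simp at ha
      simp [ha]

theorem takeWhile_ne_eq_take_idxOf {α : Type} [DecidableEq α] (v : α) (l : List α) :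
    l.takeWhile (· != v) = l.take (List.idxOf v l) := by
  induction l with
  | nil => rfl
  | cons a l ih =>
    by_cases h : a = v
    · subst h; simp [List.idxOf_cons_self]
    · have hb : (a != v) = true := by simpa using h
      simp [hb, List.idxOf_cons_ne _ h, ih]

theorem idxOf?_getD_of_mem {α : Type} [DecidableEq α] (v : α) (l : List α) (h : v ∈ l) :
    (List.idxOf? v l).getD 0 = List.idxOf v l := by
  cases hi : List.idxOf? v l with
  | none => exact absurd (List.idxOf?_eq_none_iff.mp hi) (by simpa using h)
  | some i => rw [List.idxOf_eq_getD_idxOf?, hi]; rfl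

-- index-and-slice on the reversed list = keep the suffix after the last '/' token
theorem slice_after_last_slash (toks : List String) (h : "/" ∈ toks) :
    PySem.List.slice toks (some ((toks.length : Int) - (((PySem.List.index? toks.reverse "/").getD 0 : Nat) : Int))) none
      = (toks.reverse.takeWhile (· != "/")).reverse := by
  have hmem : "/" ∈ toks.reverse := by simpa using h
  have hk : (PySem.List.index? toks.reverse "/").getD 0 = List.idxOf "/" toks.reverse := by
    simpa [PySem.List.index?] using idxOf?_getD_of_mem "/" toks.reverse hmem
  set k := List.idxOf "/" toks.reverse with hkdef
  have hkle : k ≤ toks.length := by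
    have := List.idxOf_lt_length_of_mem hmem
    simp only [List.length_reverse] at this
    omega
  rw [hk, PySem.List.slice_from toks (by omega)]
  have htn : ((toks.length : Int) - (k : Int)).toNat = toks.length - k := by omega
  rw [htn, takeWhile_ne_eq_take_idxOf, ← hkdef]
  conv_rhs => rw [show k = toks.length - (toks.length - k) by omega]
  rw [← List.reverse_drop, List.reverse_reverse]

-- last element of a single-character split = suffix after the last occurrence of that character
theorem go_getLast? (c : Char) (l : List Char) :
    ∀ (fuel : Nat) (cur : List Char) (acc : List (List Char)) (hf : l.length ≤ fuel),
      (PySem.Chars.splitOn.go [c] fuel l cur acc).getLast? =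
        some (if c ∈ l then (l.reverse.takeWhile (· != c)).reverse else cur.reverse ++ l) := by
  induction l with
  | nil =>
    intro fuel cur acc hf
    cases fuel with
    | zero => simp [PySem.Chars.splitOn.go, List.getLast?_reverse]
    | succ f => simp [PySem.Chars.splitOn.go, List.getLast?_reverse]
  | cons a rest ih =>
    intro fuel cur acc hf
    cases fuel with
    | zero => simp at hf
    | succ f =>
      have hrest : rest.length ≤ f := by simp at hf; omega
      by_cases hac : a = c
      · subst hac
        have hpre : List.isPrefixOf [a] (a :: rest) = true := by simp [List.isPrefixOf]
        rw [show PySem.Chars.splitOn.go [a] (f+1) (a :: rest) cur acc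
            = PySem.Chars.splitOn.go [a] f (List.drop 1 (a :: rest)) [] (cur.reverse :: acc) by
          simp [PySem.Chars.splitOn.go, hpre]]
        simp only [List.drop_one, List.tail_cons]
        rw [ih f [] (cur.reverse :: acc) hrest]
        by_cases hm : a ∈ rest
        · have hm' : a ∈ a :: rest := by simp
          have hfail : ∃ x ∈ rest.reverse, (x != a) = false := ⟨a, by simpa using hm, by simp⟩
          simp only [hm, hm', if_true, List.reverse_cons]
          rw [takeWhile_append_fail _ _ _ hfail]
        · have hall : ∀ x ∈ rest.reverse, (x != a) = true := by
            intro x hx; simp only [List.mem_reverse] at hx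
            simp only [bne_iff_ne, ne_eq]; intro he; exact hm (he ▸ hx)
          simp only [hm, if_false, List.reverse_nil, List.nil_append, List.mem_cons, true_or,
            if_true, List.reverse_cons]
          rw [takeWhile_append_all _ _ _ hall]
          simp
      · have hpre : List.isPrefixOf [c] (a :: rest) = false := by
          simp [List.isPrefixOf, Ne.symm hac]
        rw [show PySem.Chars.splitOn.go [c] (f+1) (a :: rest) cur acc
            = PySem.Chars.splitOn.go [c] f rest (a :: cur) acc by
          simp [PySem.Chars.splitOn.go, hpre]]
        rw [ih f (a :: cur) acc hrest]
        by_cases hm : c ∈ rest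
        · have hm' : c ∈ a :: rest := by simp [hm]
          have hfail : ∃ x ∈ rest.reverse, (x != c) = false := ⟨c, by simpa using hm, by simp⟩
          simp only [hm, hm', if_true, List.reverse_cons]
          rw [takeWhile_append_fail _ _ _ hfail]
        · have hm' : c ∉ a :: rest := by simp [hm, Ne.symm hac]
          simp [hm, hm']

theorem splitOn_getLast? (c : Char) (l : List Char) :
    (PySem.Chars.splitOn l [c]).getLast? = some ((l.reverse.takeWhile (· != c)).reverse) := by
  rw [PySem.Chars.splitOn]
  rw [go_getLast? c l (l.length + 1) [] [] (by omega)]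
  by_cases hm : c ∈ l
  · simp [hm]
  · have hall : ∀ x ∈ l.reverse, (x != c) = true := by
      intro x hx; simp only [List.mem_reverse] at hx
      simp only [bne_iff_ne, ne_eq]; intro he; exact hm (he ▸ hx)
    rw [takeWhile_all_eq _ _ hall]
    simp [hm]

theorem split_last_eq_rpart (c : Char) (file : String) :
    ((PySem.Str.split? file (String.ofList [c])).getD []).getLastD "" = pvRpartAfter c file := by
  have hsep : (String.ofList [c]).toList = [c] := by simp
  rw [PySem.Str.split?, hsep, PySem.Chars.split?]
  simp only [List.isEmpty_cons, if_false, Option.map_some, Option.getD_some, Bool.false_eq_true]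
  rw [List.getLastD_eq_getLast?, List.getLast?_map, splitOn_getLast? c file.toList]
  rfl

-- the token list both ports feed to ''.join is the same
theorem middle_eq (toks : List String) :
    (if toks.contains "/" then
      PySem.List.slice toks (some ((toks.length : Int) - (((PySem.List.index? toks.reverse "/").getD 0 : Nat) : Int))) none
    else toks) = (pvRevTake toks.reverse []).reverse := by
  rw [pvRevTake_eq]
  by_cases h : "/" ∈ toks
  · simp only [List.contains_eq_mem, h, decide_true, if_true, List.nil_append]
    exact slice_after_last_slash toks h
  · have hall : ∀ x ∈ toks.reverse, (x != "/") = true := by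
      intro x hx; simp only [List.mem_reverse] at hx
      simp only [bne_iff_ne, ne_eq]; intro he; exact h (he ▸ hx)
    simp only [List.contains_eq_mem, h, decide_false, if_false, List.nil_append, Bool.false_eq_true]
    rw [takeWhile_all_eq _ _ hall, List.reverse_reverse]

-- ===== VERDICT (by name: the statement is the Claim_ definition above) =====
theorem line_to_extension_spec : Claim_equal_line_to_extension := by
  intro line _
  unfold Spec_line_to_extension line_to_extension line_to_extension_alt
  simp only [middle_eq]
  have hdot : ("." : String) = String.ofList ['.'] := by decide
  have hsl : ("/" : String) = String.ofList ['/'] := by decide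
  split
  · rw [hdot, split_last_eq_rpart]
  · rw [hsl, split_last_eq_rpart]
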